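-- pv_equiv track=rewrite | github.com/utep-cs-systems-courses/1-shell-maholguin6 | shell-final.py | operator_pipe_1
-- ===== SOURCE A (Python) =====
-- def peek_stack(stack):
--
--     if stack:
--         return stack[-1]    # this will get the last element of stack
--     else:
--         return None
--
-- def operator_pipe_1(l):
--     args_p_1 = []; args_p_2 = []
--     l_a = l.split()
--     prog = list(reversed(l_a))
--     while peek_stack(prog) != None:
--         if peek_stack(prog) != '|':
--             args_p_2.append(prog.pop())
--
--         if peek_stack(prog) == '|':
--             args_p_1 = args_p_2.copy()
--             args_p_2.clear()
--             prog.pop()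
--
--         if peek_stack(prog) == None:
--             return args_p_1, args_p_2
-- ===== SOURCE B (Python) =====
-- def operator_pipe_1(l):
--     tokens = l.split()
--     if not tokens:
--         return None
--     groups = [[]]
--     for t in tokens:
--         if t == '|':
--             groups.append([])
--         else:
--             groups[-1].append(t)
--     return (groups[-2] if len(groups) >= 2 else [], groups[-1])
-- ===== Notes on version B (the rewrite author's own statement) =====
-- stated objective: simpler
-- what changed: Replaces the reversed-list stack with repeated peek/pop and three in-loop conditionals by a single forward pass that partitions the tokens into pipe-delimited groups and returns the last two groups.
-- outside the precondition, e.g. on operator_pipe_1('  '): A returns None, B returns None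
import Mathlib
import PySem

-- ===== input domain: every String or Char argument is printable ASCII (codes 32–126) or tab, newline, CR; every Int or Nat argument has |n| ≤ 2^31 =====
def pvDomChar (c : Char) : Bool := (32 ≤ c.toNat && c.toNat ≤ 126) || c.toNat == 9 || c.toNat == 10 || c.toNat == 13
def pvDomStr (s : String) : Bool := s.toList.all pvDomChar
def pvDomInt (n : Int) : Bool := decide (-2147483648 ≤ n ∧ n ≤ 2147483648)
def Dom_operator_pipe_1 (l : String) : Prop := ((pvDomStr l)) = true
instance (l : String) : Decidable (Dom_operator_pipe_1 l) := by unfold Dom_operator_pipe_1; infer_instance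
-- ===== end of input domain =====

-- B is a single forward pass that groups the tokens by '|' and returns the last two groups;
-- equivalence is about the return value only.

-- ===== PORT A =====
def peekStack (stack : List String) : Option String :=
  if stack ≠ [] then PySem.List.pyGet? stack (-1) else none

-- the while loop of A: prog is the reversed token list, popped from the back
def pipeLoopA (prog args1 args2 : List String) : List String × List String :=
  if hp : prog = [] then (args1, args2)       -- peek = None at loop entry: Python falls off and returns None (outside Pre_)
  else
    if peekStack prog = some "|" then
      -- first 'if' skipped, second 'if' fires: args_p_1 := args_p_2.copy(), args_p_2.clear(), prog.pop()
      let prog2 := prog.dropLast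
      if prog2 = [] then (args2, []) else pipeLoopA prog2 args2 []
    else
      -- first 'if' fires: args_p_2.append(prog.pop())
      let prog1 := prog.dropLast
      let args2a := args2 ++ [(PySem.List.pyGet? prog (-1)).getD ""]
      if peekStack prog1 = some "|" then
        let prog2 := prog1.dropLast
        if prog2 = [] then (args2a, []) else pipeLoopA prog2 args2a []
      else
        if prog1 = [] then (args1, args2a) else pipeLoopA prog1 args1 args2a
termination_by prog.length
decreasing_by
  all_goals
    have h0 : 0 < prog.length := List.length_pos_of_ne_nil hp
    simp [List.length_dropLast]
    omega

def operator_pipe_1 (l : String) : List String × List String :=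
  let l_a := PySem.Str.split₀ l
  let prog := l_a.reverse
  pipeLoopA prog [] []

-- ===== PORT B =====
def operator_pipe_1_alt (l : String) : List String × List String :=
  let tokens := PySem.Str.split₀ l
  if tokens = [] then ([], [])                -- Python B returns None here (outside Pre_)
  else
    let groups := tokens.foldl
      (fun gs t => if t = "|" then gs ++ [[]] else gs.dropLast ++ [(PySem.List.pyGet? gs (-1)).getD [] ++ [t]])
      [[]]
    ((if 2 ≤ groups.length then (PySem.List.pyGet? groups (-2)).getD [] else []),
     (PySem.List.pyGet? groups (-1)).getD [])

-- ===== PRECONDITION & SPEC =====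
-- Pre_ excludes inputs with no tokens (whitespace-only l): there A's while loop never runs and
-- the Python returns bare None, which is not a value of the declared pair type.
def Pre_operator_pipe_1 (l : String) : Prop := PySem.Str.split₀ l ≠ []
instance (l : String) : Decidable (Pre_operator_pipe_1 l) := by unfold Pre_operator_pipe_1; infer_instance
def pvWitness_operator_pipe_1 : String := "ls -l | wc"

def Spec_operator_pipe_1 (l : String) (out : List String × List String) : Prop := out = operator_pipe_1_alt l
instance (l : String) (out : List String × List String) : Decidable (Spec_operator_pipe_1 l out) := by unfold Spec_operator_pipe_1; infer_instance

-- ===== CLAIM (what is proved, stated in full; the proofs are below) =====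
def Claim_equal_operator_pipe_1 : Prop := ∀ (l : String), Dom_operator_pipe_1 l → Pre_operator_pipe_1 l → Spec_operator_pipe_1 l (operator_pipe_1 l)

-- ===== LEMMAS AND PROOFS =====

-- common reference recursion over the token list (front to back)
def specFn : List String → List String → List String → List String × List String
  | [], a1, a2 => (a1, a2)
  | t :: ts, a1, a2 => if t = "|" then specFn ts a2 [] else specFn ts a1 (a2 ++ [t])

theorem peek_app (xs : List String) (t : String) :
    peekStack (xs ++ [t]) = some t := by
  simp [peekStack, PySem.List.pyGet?_neg_one]

theorem peek_app2 (xs : List String) (a b : String) :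
    peekStack (xs ++ [a, b]) = some b := by
  simp [peekStack, PySem.List.pyGet?_neg_one]

theorem last_app2 (xs : List String) (a b : String) :
    (PySem.List.pyGet? (xs ++ [a, b]) (-1)).getD "" = b := by
  simp [PySem.List.pyGet?_neg_one]

theorem pipeLoopA_eq_specFn (ts a1 a2 : List String) :
    pipeLoopA ts.reverse a1 a2 = specFn ts a1 a2 := by
  induction hn : ts.length using Nat.strong_induction_on generalizing ts a1 a2 with
  | _ n ih =>
  match ts with
  | [] => simp [pipeLoopA, specFn]
  | t :: rest =>
    rw [pipeLoopA]
    have ih1 : ∀ a1 a2, pipeLoopA rest.reverse a1 a2 = specFn rest a1 a2 :=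
      fun a1 a2 => ih rest.length (by subst hn; simp) rest a1 a2 rfl
    by_cases ht : t = "|"
    · subst ht
      by_cases hr : rest = []
      · subst hr; simp [peekStack, specFn, PySem.List.pyGet?_neg_one]
      · simp [peek_app, hr, ih1, specFn]
    · cases rest with
      | nil => simp [peekStack, specFn, ht, PySem.List.pyGet?_neg_one]
      | cons r rest' =>
        have ih2 : ∀ a1 a2, pipeLoopA rest'.reverse a1 a2 = specFn rest' a1 a2 :=
          fun a1 a2 => ih rest'.length (by subst hn; simp) rest' a1 a2 rfl
        by_cases hr : r = "|"
        · subst hr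
          by_cases hr' : rest' = []
          · subst hr'; simp [peekStack, specFn, ht, PySem.List.pyGet?_neg_one]
          · simp [peek_app, peek_app2, last_app2, specFn, ht, hr', ih2]
        · have h1 := ih1 a1 (a2 ++ [t])
          simp only [List.reverse_cons] at h1
          simp [specFn, hr] at h1
          simp [peek_app, peek_app2, last_app2, specFn, ht, hr, h1]

-- the pre-last group of a nonempty group list depends only on what precedes the last group
theorem pen_eq (gs : List (List String)) (a : List String) :
    (PySem.List.pyGet? (gs ++ [a]) (-2)).getD [] = gs.getLast?.getD [] := by
  rcases gs.eq_nil_or_concat with rfl | ⟨ys, y, rfl⟩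
  · simp [PySem.List.pyGet?, PySem.List.pyIdx?]
  · simp only [List.concat_eq_append]
    rw [show (ys ++ [y]) ++ [a] = ys ++ [y, a] by simp,
      PySem.List.pyGet?_neg_ofNat _ 2 (by omega) (by simp)]
    simp

theorem pen_app2 (gs : List (List String)) (a b : List String) :
    (PySem.List.pyGet? (gs ++ [a, b]) (-2)).getD [] = a := by
  rw [show gs ++ [a, b] = (gs ++ [a]) ++ [b] by simp, pen_eq]
  simp

theorem guard_pen (gs : List (List String)) (a : List String) :
    (if 2 ≤ (gs ++ [a]).length then (PySem.List.pyGet? (gs ++ [a]) (-2)).getD [] else [])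
      = (PySem.List.pyGet? (gs ++ [a]) (-2)).getD [] := by
  cases gs with
  | nil => simp [PySem.List.pyGet?, PySem.List.pyIdx?]
  | cons g gs => rw [if_pos (by simp)]

theorem alt_fold_eq_specFn (ts cur : List String) (gs : List (List String)) :
    ((if 2 ≤ (ts.foldl (fun gs t => if t = "|" then gs ++ [[]]
                     else gs.dropLast ++ [(PySem.List.pyGet? gs (-1)).getD [] ++ [t]]) (gs ++ [cur])).length
        then (PySem.List.pyGet? (ts.foldl (fun gs t => if t = "|" then gs ++ [[]]
                     else gs.dropLast ++ [(PySem.List.pyGet? gs (-1)).getD [] ++ [t]]) (gs ++ [cur])) (-2)).getD [] else []),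
     (PySem.List.pyGet? (ts.foldl (fun gs t => if t = "|" then gs ++ [[]]
                     else gs.dropLast ++ [(PySem.List.pyGet? gs (-1)).getD [] ++ [t]]) (gs ++ [cur])) (-1)).getD [])
    = specFn ts ((PySem.List.pyGet? (gs ++ [cur]) (-2)).getD []) cur := by
  induction ts generalizing cur gs with
  | nil =>
    simp only [List.foldl_nil, specFn, guard_pen, PySem.List.pyGet?_neg_one_append_singleton,
      Option.getD_some]
  | cons t ts ih =>
    simp only [List.foldl_cons]
    by_cases ht : t = "|"
    · subst ht
      rw [if_pos rfl,
        show specFn ("|" :: ts) ((PySem.List.pyGet? (gs ++ [cur]) (-2)).getD []) cur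
          = specFn ts cur [] from by simp [specFn],
        ih [] (gs ++ [cur]),
        show gs ++ [cur] ++ [[]] = gs ++ [cur, []] from by simp, pen_app2]
    · rw [if_neg ht,
        show ((gs ++ [cur]).dropLast ++ [(PySem.List.pyGet? (gs ++ [cur]) (-1)).getD [] ++ [t]])
          = gs ++ [cur ++ [t]] from by
            simp [PySem.List.pyGet?_neg_one_append_singleton],
        show specFn (t :: ts) ((PySem.List.pyGet? (gs ++ [cur]) (-2)).getD []) cur
          = specFn ts ((PySem.List.pyGet? (gs ++ [cur]) (-2)).getD []) (cur ++ [t]) from by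
            simp [specFn, ht],
        ih (cur ++ [t]) gs, pen_eq, pen_eq]

-- ===== VERDICT (by name: the statement is the Claim_ definition above) =====
theorem operator_pipe_1_spec : Claim_equal_operator_pipe_1 := by
  intro l _ hpre
  unfold Spec_operator_pipe_1 operator_pipe_1 operator_pipe_1_alt
  simp only
  rw [if_neg hpre]
  rw [pipeLoopA_eq_specFn]
  exact (alt_fold_eq_specFn (PySem.Str.split₀ l) [] []).symm
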